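-- pv_equiv track=rewrite | github.com/Bestplus-Fling/Algorithm_Study | minwoo/Gready/BOJ_16953_250419/sol_greedy.py | f
-- ===== SOURCE A (Python) =====
-- from collections import deque
--
-- def f(x, y):
--     queue = deque([(y, 1)])
--     while queue:
--         n, cnt = queue.popleft()
--         if n == x:
--             return cnt
--         cnt += 1
--         if n % 10 != 1:
--             case1 = n // 2
--             if case1 >= x:
--                 queue.append((case1, cnt))
--         else:
--             case2 = n // 10
--             if case2 >= x:
--                 queue.append((case2, cnt))
--     return -1
-- ===== SOURCE B (Python) =====
-- def f(x, y):
--     # recursive back-to-front: walk down from y, count +1 on the way back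
--     if y < x:
--         return -1
--     if y == x:
--         return 1
--     r = f(x, y // 10 if y % 10 == 1 else y // 2)
--     return -1 if r == -1 else r + 1
-- ===== Notes on version B (the rewrite author's own statement) =====
-- stated objective: simpler
-- what changed: Replaces the BFS over a deque of (value, count) pairs with a direct recursion from y down that returns the step count on the way back (+1 per level), with no queue and no carried counter.
-- outside the precondition, e.g. on f(-1, -2): A returns 2, B returns -1
import Mathlib
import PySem

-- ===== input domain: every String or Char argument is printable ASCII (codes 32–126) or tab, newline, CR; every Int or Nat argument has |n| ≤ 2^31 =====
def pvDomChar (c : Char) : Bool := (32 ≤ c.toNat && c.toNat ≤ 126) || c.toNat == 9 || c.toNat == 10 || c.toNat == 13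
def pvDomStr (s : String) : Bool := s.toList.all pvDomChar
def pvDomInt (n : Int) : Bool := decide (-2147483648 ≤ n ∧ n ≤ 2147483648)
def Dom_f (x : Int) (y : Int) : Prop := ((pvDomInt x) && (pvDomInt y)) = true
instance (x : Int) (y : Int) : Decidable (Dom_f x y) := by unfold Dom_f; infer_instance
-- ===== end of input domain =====

-- B replaces A's deque-based BFS by a plain recursion from y downward (no queue,
-- no carried counter): simpler, same cost. Equivalence is proved on x ≥ 1.

-- ===== PORT A =====
-- A's 'while queue' loop, one fuel unit per popleft; fuel (y-x).toNat + 2 exceeds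
-- the number of pops A performs on any input with x ≥ 1 (each continued pop
-- strictly decreases n while n stays ≥ x), so the sentinel branch is unreachable
-- on Pre_f and the port is exact there.
def fALoop (fuel : Nat) (x : Int) (queue : List (Int × Int)) : Int :=
  match fuel with
  | 0 => -1  -- fuel exhausted (unreachable for the fuel chosen below, on Pre_f)
  | fuel + 1 =>
    match queue with
    | [] => -1
    | (n, cnt) :: rest =>
      if n = x then cnt
      else
        let cnt := cnt + 1
        if PySem.Int.mod n 10 ≠ 1 then
          let case1 := PySem.Int.floordiv n 2
          fALoop fuel x (rest ++ (if case1 ≥ x then [(case1, cnt)] else []))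
        else
          let case2 := PySem.Int.floordiv n 10
          fALoop fuel x (rest ++ (if case2 ≥ x then [(case2, cnt)] else []))

def f (x : Int) (y : Int) : Int := fALoop ((y - x).toNat + 2) x [(y, 1)]

-- ===== PORT B =====
-- Source B's recursion, one fuel unit per call; same fuel bound, exact on Pre_f
-- (B's recursion depth is at most the number of pops A performs).
def fBRec (fuel : Nat) (x : Int) (y : Int) : Int :=
  match fuel with
  | 0 => -1  -- fuel exhausted (unreachable for the fuel chosen below, on Pre_f)
  | fuel + 1 =>
    if y < x then -1
    else if y = x then 1
    else
      let r := fBRec fuel x (if PySem.Int.mod y 10 = 1 then PySem.Int.floordiv y 10 else PySem.Int.floordiv y 2)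
      if r = -1 then -1 else r + 1

def f_alt (x : Int) (y : Int) : Int := fBRec ((y - x).toNat + 2) x y

-- ===== PRECONDITION & SPEC =====
-- Pre_f restricts to nonnegative x (BOJ 16953 has 1 ≤ x ≤ y; x = 0 is harmless).
-- For x < 0 the halving chain need not decrease: A loops forever on many such
-- inputs (e.g. x = -1, y = 0), and where it does return (e.g. x = -1, y = -2,
-- where floor division moves negative values UP towards x) that value is an
-- artefact of the unintended domain which B's downward recursion does not chase.
def Pre_f (x : Int) (y : Int) : Prop := 0 ≤ x
instance (x : Int) (y : Int) : Decidable (Pre_f x y) := by unfold Pre_f; infer_instance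
def pvWitness_f : Int × Int := (2, 162)

def Spec_f (x : Int) (y : Int) (out : Int) : Prop := out = f_alt x y
instance (x : Int) (y : Int) (out : Int) : Decidable (Spec_f x y out) := by unfold Spec_f; infer_instance

-- ===== CLAIM (what is proved, stated in full; the proofs are below) =====
def Claim_equal_f : Prop := ∀ (x : Int) (y : Int), Dom_f x y → Pre_f x y → Spec_f x y (f x y)

-- ===== LEMMAS AND PROOFS =====

lemma fALoop_nil (fuel : Nat) (x : Int) : fALoop fuel x [] = -1 := by
  cases fuel <;> rfl

-- B returns -1 or a positive count.
lemma fBRec_neg1_or_pos (fuel : Nat) (x y : Int) :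
    fBRec fuel x y = -1 ∨ 1 ≤ fBRec fuel x y := by
  induction fuel generalizing y with
  | zero => left; rfl
  | succ fuel ih =>
    by_cases h1 : y < x
    · simp [fBRec, h1]
    · by_cases h2 : y = x
      · simp [fBRec, h1, h2]
      · simp only [fBRec, if_neg h1, if_neg h2]
        rcases ih (if PySem.Int.mod y 10 = 1 then PySem.Int.floordiv y 10 else PySem.Int.floordiv y 2) with h | h
        · left; rw [if_pos h]
        · have hne : ¬ fBRec fuel x (if PySem.Int.mod y 10 = 1 then PySem.Int.floordiv y 10 else PySem.Int.floordiv y 2) = -1 := by omega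
          right; rw [if_neg hne]; omega

-- below x, B answers -1 at any fuel
lemma fBRec_of_lt (fuel : Nat) (x y : Int) (h : y < x) : fBRec fuel x y = -1 := by
  cases fuel with
  | zero => rfl
  | succ fuel => simp [fBRec, h]

-- with x ≥ 1, a value below x has both successors below x
lemma succ_lt_of_lt (x y : Int) (hx : 0 ≤ x) (h : y < x) :
    PySem.Int.floordiv y 2 < x ∧ PySem.Int.floordiv y 10 < x := by
  rw [PySem.Int.floordiv_eq_ediv_of_pos (by omega : (0:Int) < 2),
      PySem.Int.floordiv_eq_ediv_of_pos (by omega : (0:Int) < 10)]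
  omega

-- one step of the lockstep argument, shared by the two modulus branches
lemma step_case (fuel : Nat) (x n c s : Int) (hnx : ¬ n = x)
    (hlt : n < x → s < x)
    (hB : fBRec (fuel + 1) x n =
      if n < x then -1 else (if fBRec fuel x s = -1 then -1 else fBRec fuel x s + 1))
    (ih : ∀ (m d : Int), fALoop fuel x [(m, d)] =
      (if fBRec fuel x m = -1 then -1 else fBRec fuel x m + d - 1)) :
    fALoop fuel x (if s ≥ x then [(s, c + 1)] else []) =
      (if fBRec (fuel + 1) x n = -1 then -1 else fBRec (fuel + 1) x n + c - 1) := by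
  by_cases hs : s ≥ x
  · have hnlt : ¬ n < x := fun h => absurd (hlt h) (by omega)
    rw [if_pos hs, hB, if_neg hnlt, ih s (c + 1)]
    rcases fBRec_neg1_or_pos fuel x s with h | h
    · simp [h]
    · have hr1 : ¬ fBRec fuel x s = -1 := by omega
      have hr2 : ¬ fBRec fuel x s + 1 = -1 := by omega
      simp only [if_neg hr1, if_neg hr2]
      omega
  · rw [if_neg hs, fALoop_nil, hB]
    by_cases hn : n < x
    · simp [hn]
    · rw [fBRec_of_lt fuel x s (by omega)]
      simp [hn]

-- lockstep: A's queue is always a singleton, and its loop mirrors B's recursion,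
-- the carried counter cnt matching B's +1-on-return with offset c - 1
lemma loop_eq (fuel : Nat) (x : Int) (hx : 0 ≤ x) :
    ∀ (n c : Int), fALoop fuel x [(n, c)] =
      (if fBRec fuel x n = -1 then -1 else fBRec fuel x n + c - 1) := by
  induction fuel with
  | zero => intro n c; rfl
  | succ fuel ih =>
    intro n c
    by_cases hnx : n = x
    · subst hnx
      simp only [fALoop, fBRec, if_pos rfl, if_neg (show ¬ n < n by omega)]
      norm_num
    · simp only [fALoop, if_neg hnx, List.nil_append]
      by_cases hmod : PySem.Int.mod n 10 ≠ 1
      · rw [if_pos hmod]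
        refine step_case fuel x n c (PySem.Int.floordiv n 2) hnx
          (fun h => (succ_lt_of_lt x n hx h).1) ?_ ih
        simp only [fBRec]
        rw [if_neg (show ¬ PySem.Int.mod n 10 = 1 from hmod), if_neg hnx]
      · rw [if_neg hmod]
        push_neg at hmod
        refine step_case fuel x n c (PySem.Int.floordiv n 10) hnx
          (fun h => (succ_lt_of_lt x n hx h).2) ?_ ih
        simp only [fBRec]
        rw [if_pos hmod, if_neg hnx]

-- ===== VERDICT (by name: the statement is the Claim_ definition above) =====
theorem f_spec : Claim_equal_f := by
  intro x y _ hpre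
  unfold Spec_f f f_alt
  rw [loop_eq ((y - x).toNat + 2) x hpre y 1]
  rcases fBRec_neg1_or_pos ((y - x).toNat + 2) x y with h | h
  · rw [h]; simp [h]
  · have h1 : ¬ fBRec ((y - x).toNat + 2) x y = -1 := by omega
    simp only [if_neg h1]
    omega
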